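-- pv_equiv track=rewrite | github.com/Chains99/Battlefield-Simulator | A_star/A_star.py | adyacent_nodes
-- ===== SOURCE A (Python) =====
-- def adyacent_nodes(map, pos):
--
--     top = max(pos[0]-1, 0)
--     bottom = min(pos[0]+1, len(map)-1)
--     left = max(pos[1]-1, 0)
--     right = min(pos[1] + 1, len(map[0])-1)
--
--     for i in range(top, bottom+1):
--         for j in range(left, right+1):
--             yield (i, j)
-- ===== SOURCE B (Python) =====
-- def adyacent_nodes(map, pos):
--     # Scan the whole grid index space and keep the cells at Chebyshev distance <= 1 from pos.
--     cols = len(map[0])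
--     for i in range(len(map)):
--         if abs(i - pos[0]) <= 1:
--             for j in range(cols):
--                 if abs(j - pos[1]) <= 1:
--                     yield (i, j)
-- ===== Notes on version B (the rewrite author's own statement) =====
-- stated objective: alternative
-- what changed: Instead of precomputing clamped top/bottom/left/right bounds and looping the 3x3 block, B scans the entire grid index space (all row indices, all column indices) and filters each cell by Chebyshev distance <= 1 from pos.
import Mathlib
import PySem

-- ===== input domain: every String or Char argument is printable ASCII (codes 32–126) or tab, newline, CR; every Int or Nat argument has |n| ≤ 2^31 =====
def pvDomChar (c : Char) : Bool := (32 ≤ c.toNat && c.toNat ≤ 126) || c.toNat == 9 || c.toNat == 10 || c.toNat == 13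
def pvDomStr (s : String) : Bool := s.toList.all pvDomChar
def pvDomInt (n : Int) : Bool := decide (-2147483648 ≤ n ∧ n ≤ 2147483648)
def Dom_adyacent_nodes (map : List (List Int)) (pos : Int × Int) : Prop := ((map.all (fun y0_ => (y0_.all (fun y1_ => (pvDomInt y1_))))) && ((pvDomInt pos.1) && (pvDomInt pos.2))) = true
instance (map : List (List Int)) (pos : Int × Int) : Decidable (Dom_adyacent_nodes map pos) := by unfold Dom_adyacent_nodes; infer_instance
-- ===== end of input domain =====

-- B scans the whole grid index space and keeps the cells at Chebyshev distance ≤ 1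
-- from pos, instead of A's precomputed clamped 3x3 block bounds (alternative algorithm).

-- ===== PORT A =====
-- literal transliteration of A; the generator's yields are collected into a list.
-- `map.headD []` is Python's `map[0]` on the nonempty maps Pre_ admits.
def adyacent_nodes (map : List (List Int)) (pos : Int × Int) : List (Int × Int) :=
  let top : Int := max (pos.1 - 1) 0
  let bottom : Int := min (pos.1 + 1) ((map.length : Int) - 1)
  let left : Int := max (pos.2 - 1) 0
  let right : Int := min (pos.2 + 1) (((map.headD []).length : Int) - 1)
  (PySem.List.pyRange top (bottom + 1) 1).flatMap (fun i =>
    (PySem.List.pyRange left (right + 1) 1).map (fun j => (i, j)))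

-- ===== PORT B =====
def adyacent_nodes_alt (map : List (List Int)) (pos : Int × Int) : List (Int × Int) :=
  let cols : Int := (map.headD []).length
  (PySem.List.pyRange 0 (map.length : Int) 1).flatMap (fun i =>
    if |i - pos.1| ≤ 1 then
      (PySem.List.pyRange 0 cols 1).flatMap (fun j =>
        if |j - pos.2| ≤ 1 then [(i, j)] else [])
    else [])

-- ===== PRECONDITION & SPEC =====
-- Pre_ excludes only the empty map, on which Python A raises IndexError at `map[0]`.
def Pre_adyacent_nodes (map : List (List Int)) (pos : Int × Int) : Prop := map ≠ []
instance (map : List (List Int)) (pos : Int × Int) : Decidable (Pre_adyacent_nodes map pos) := by unfold Pre_adyacent_nodes; infer_instance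

def pvWitness_adyacent_nodes : List (List Int) × (Int × Int) := ([[0, 0], [0, 0]], (1, 1))

def Spec_adyacent_nodes (map : List (List Int)) (pos : Int × Int) (out : List (Int × Int)) : Prop := out = adyacent_nodes_alt map pos
instance (map : List (List Int)) (pos : Int × Int) (out : List (Int × Int)) : Decidable (Spec_adyacent_nodes map pos out) := by unfold Spec_adyacent_nodes; infer_instance

-- ===== CLAIM (what is proved, stated in full; the proofs are below) =====
def Claim_equal_adyacent_nodes : Prop := ∀ (map : List (List Int)) (pos : Int × Int), Dom_adyacent_nodes map pos → Pre_adyacent_nodes map pos → Spec_adyacent_nodes map pos (adyacent_nodes map pos)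

-- ===== LEMMAS AND PROOFS =====

theorem flatMap_if_nil {α β : Type} (P : α → Prop) [DecidablePred P] (g : α → List β)
    (l : List α) (h : ∀ x ∈ l, ¬ P x) :
    l.flatMap (fun x => if P x then g x else []) = [] := by
  induction l with
  | nil => rfl
  | cons a t ih =>
    simp only [List.flatMap_cons]
    rw [if_neg (h a (List.mem_cons_self)), ih (fun x hx => h x (List.mem_cons_of_mem a hx))]
    rfl

theorem flatMap_if_self {α β : Type} (P : α → Prop) [DecidablePred P] (g : α → List β)
    (l : List α) (h : ∀ x ∈ l, P x) :
    l.flatMap (fun x => if P x then g x else []) = l.flatMap g := by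
  induction l with
  | nil => rfl
  | cons a t ih =>
    simp only [List.flatMap_cons]
    rw [if_pos (h a (List.mem_cons_self)), ih (fun x hx => h x (List.mem_cons_of_mem a hx))]

/-- pushing a guard out of a flatMap: filter first, then flatMap. -/
theorem flatMap_if_flatMap {α β : Type} (P : α → Prop) [DecidablePred P] (g : α → List β)
    (l : List α) :
    l.flatMap (fun x => if P x then g x else []) =
      (l.flatMap (fun x => if P x then [x] else [])).flatMap g := by
  induction l with
  | nil => rfl
  | cons a t ih =>
    simp only [List.flatMap_cons]
    by_cases h : P a
    · rw [if_pos h, if_pos h, ih]; simp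
    · rw [if_neg h, if_neg h, ih]; simp

/-- A's clamped range around `p` is the Chebyshev-filtered full index range of B. -/
theorem range3 (p n : Int) :
    (PySem.List.pyRange 0 n 1).flatMap (fun x => if |x - p| ≤ 1 then [x] else []) =
      PySem.List.pyRange (max (p - 1) 0) (min (p + 1) (n - 1) + 1) 1 := by
  by_cases hab : min (p + 1) (n - 1) + 1 ≤ max (p - 1) 0
  · rw [PySem.List.pyRange_one_eq_nil hab]
    refine flatMap_if_nil _ _ _ (fun x hx => ?_)
    rw [PySem.List.mem_pyRange_one] at hx
    rw [abs_le]
    omega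
  · rw [Int.not_le] at hab
    have h0 : (0 : Int) ≤ max (p - 1) 0 := by omega
    have h1 : max (p - 1) 0 ≤ min (p + 1) (n - 1) + 1 := by omega
    have h2 : min (p + 1) (n - 1) + 1 ≤ n := by omega
    rw [PySem.List.pyRange_one_append 0 (max (p - 1) 0) n h0 (by omega),
        PySem.List.pyRange_one_append (max (p - 1) 0) (min (p + 1) (n - 1) + 1) n h1 h2,
        List.flatMap_append, List.flatMap_append]
    have e1 : (PySem.List.pyRange 0 (max (p - 1) 0) 1).flatMap
        (fun x => if |x - p| ≤ 1 then [x] else []) = [] :=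
      flatMap_if_nil _ _ _ (fun x hx => by
        rw [PySem.List.mem_pyRange_one] at hx; simp only [abs_le]; omega)
    have e3 : (PySem.List.pyRange (min (p + 1) (n - 1) + 1) n 1).flatMap
        (fun x => if |x - p| ≤ 1 then [x] else []) = [] :=
      flatMap_if_nil _ _ _ (fun x hx => by
        rw [PySem.List.mem_pyRange_one] at hx; simp only [abs_le]; omega)
    have e2 : (PySem.List.pyRange (max (p - 1) 0) (min (p + 1) (n - 1) + 1) 1).flatMap
        (fun x => if |x - p| ≤ 1 then [x] else []) =
        (PySem.List.pyRange (max (p - 1) 0) (min (p + 1) (n - 1) + 1) 1).flatMap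
          (fun x => [x]) :=
      flatMap_if_self _ _ _ (fun x hx => by
        rw [PySem.List.mem_pyRange_one] at hx; simp only [abs_le]; omega)
    rw [e1, e2, e3]
    simp

-- ===== VERDICT (by name: the statement is the Claim_ definition above) =====

theorem adyacent_nodes_spec : Claim_equal_adyacent_nodes := by
  intro map pos _ _
  show adyacent_nodes map pos = adyacent_nodes_alt map pos
  unfold adyacent_nodes adyacent_nodes_alt
  rw [flatMap_if_flatMap (fun i => |i - pos.1| ≤ 1), range3 pos.1 (map.length : Int)]
  refine List.flatMap_congr (fun i _ => ?_)
  rw [flatMap_if_flatMap (fun j => |j - pos.2| ≤ 1) (fun j => [(i, j)]),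
      range3 pos.2 (((map.headD []).length : Int))]
  exact List.map_eq_flatMap
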